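-- pv_equiv track=rewrite | github.com/kimmina888/https---github.com-kimmina888-PythonStudy | 2급 파이썬 문제/2급 파이썬 문제/1차 2급 1_initial_code.py | solution
-- ===== SOURCE A (Python) =====
-- def solution(shirt_size):
--     #Write code here.
--     answer = [0 for _ in range(0, 6)]
--     for size in shirt_size:
--         if(size == "XS"): answer[0]+=1
--         elif(size == "S"): answer[1]+=1
--         elif(size == "M"): answer[2]+=1
--         elif(size == "L"): answer[3]+=1
--         elif(size == "XL"): answer[4]+=1
--         elif(size == "XXL"): answer[5]+=1
--     return answer
-- ===== SOURCE B (Python) =====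
-- def solution(shirt_size):
--     return [shirt_size.count(size) for size in ("XS", "S", "M", "L", "XL", "XXL")]
-- ===== Notes on version B (the rewrite author's own statement) =====
-- stated objective: idiomatic
-- what changed: Replaces the six-way if/elif branching loop over a mutable counter array with a branch-free tally-per-key decomposition: one list comprehension reading shirt_size.count(k) for each of the six fixed sizes in order.
import Mathlib
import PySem

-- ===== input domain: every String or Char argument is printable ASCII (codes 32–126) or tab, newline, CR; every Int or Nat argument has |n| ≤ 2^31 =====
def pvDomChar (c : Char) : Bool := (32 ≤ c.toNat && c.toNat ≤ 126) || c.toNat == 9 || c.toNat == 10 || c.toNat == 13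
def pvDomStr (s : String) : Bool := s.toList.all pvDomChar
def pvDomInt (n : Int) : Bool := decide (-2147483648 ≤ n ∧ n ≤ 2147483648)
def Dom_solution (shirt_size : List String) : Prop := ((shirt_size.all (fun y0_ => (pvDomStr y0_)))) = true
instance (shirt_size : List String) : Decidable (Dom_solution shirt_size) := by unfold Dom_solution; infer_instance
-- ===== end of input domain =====

-- B replaces A's six-way if/elif branching loop with an idiomatic tally-per-key comprehension
-- (one count per fixed size); same result, no speed claim.

-- ===== PORT A =====
-- one iteration of A's loop body: the if/elif chain bumping one cell of answer
def solutionStepA (answer : List Int) (size : String) : List Int :=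
  if size == "XS" then answer.set 0 (answer.getD 0 0 + 1)
  else if size == "S" then answer.set 1 (answer.getD 1 0 + 1)
  else if size == "M" then answer.set 2 (answer.getD 2 0 + 1)
  else if size == "L" then answer.set 3 (answer.getD 3 0 + 1)
  else if size == "XL" then answer.set 4 (answer.getD 4 0 + 1)
  else if size == "XXL" then answer.set 5 (answer.getD 5 0 + 1)
  else answer

def solution (shirt_size : List String) : List Int :=
  shirt_size.foldl solutionStepA [0, 0, 0, 0, 0, 0]

-- ===== PORT B =====
def solution_alt (shirt_size : List String) : List Int :=
  ["XS", "S", "M", "L", "XL", "XXL"].map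
    (fun size => (PySem.List.count shirt_size size : Int))

-- ===== PRECONDITION & SPEC =====
def Spec_solution (shirt_size : List String) (out : List Int) : Prop := out = solution_alt shirt_size
instance (shirt_size : List String) (out : List Int) : Decidable (Spec_solution shirt_size out) := by unfold Spec_solution; infer_instance

-- ===== CLAIM (what is proved, stated in full; the proofs are below) =====
def Claim_equal_solution : Prop := ∀ (shirt_size : List String), Dom_solution shirt_size → Spec_solution shirt_size (solution shirt_size)

-- ===== LEMMAS AND PROOFS =====
-- loop invariant: A's fold from an arbitrary 6-cell state adds the count of each size to its cell
theorem solution_foldl_inv (xs : List String) (a0 a1 a2 a3 a4 a5 : Int) :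
    xs.foldl solutionStepA [a0, a1, a2, a3, a4, a5] =
      [a0 + xs.count "XS", a1 + xs.count "S", a2 + xs.count "M",
       a3 + xs.count "L", a4 + xs.count "XL", a5 + xs.count "XXL"] := by
  induction xs generalizing a0 a1 a2 a3 a4 a5 with
  | nil => simp
  | cons s xs ih =>
    simp only [List.foldl_cons, solutionStepA]
    by_cases h0 : s = "XS" <;> by_cases h1 : s = "S" <;> by_cases h2 : s = "M" <;>
      by_cases h3 : s = "L" <;> by_cases h4 : s = "XL" <;> by_cases h5 : s = "XXL" <;>
      simp_all [List.count_cons, ih] <;> ring_nf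

-- ===== VERDICT (by name: the statement is the Claim_ definition above) =====
theorem solution_spec : Claim_equal_solution := by
  intro xs _
  unfold Spec_solution solution solution_alt
  rw [solution_foldl_inv]
  simp [PySem.List.count_eq]
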